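-- pv_equiv track=rewrite | github.com/docToolchain/aoc-2020 | day21/python/jamhocken/solution.py | find_excludedict
-- ===== SOURCE A (Python) =====
-- def find_excludedict(foods, ingredients):
--     excludedict = dict()
--     for ingredient in ingredients:
--         exclusionset = set()
--         for food in foods:
--             if ingredient not in food[0]:
--                 exclusionset.update(food[1])
--         excludedict.update({ingredient: exclusionset})
--
--     return excludedict
-- ===== SOURCE B (Python) =====
-- def find_excludedict(foods, ingredients):
--     # Invert the data: map each ingredient to the tuple of indices of the foods
--     # containing it (its signature).  Ingredients with equal signatures have
--     # equal exclusion sets, so each distinct signature's exclusion set is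
--     # computed once and shared through a cache.
--     containing = {}
--     for i, food in enumerate(foods):
--         for ing in dict.fromkeys(food[0]):
--             containing.setdefault(ing, []).append(i)
--     cache = {}
--     result = {}
--     for ingredient in ingredients:
--         sig = tuple(containing.get(ingredient, ()))
--         if sig not in cache:
--             present = set(sig)
--             exclusion = set()
--             for i, food in enumerate(foods):
--                 if i not in present:
--                     exclusion.update(food[1])
--             cache[sig] = exclusion
--         result[ingredient] = cache[sig]
--     return result
-- ===== Notes on version B (the rewrite author's own statement) =====
-- stated objective: alternative
-- what changed: B builds an inverted index mapping each ingredient to the indices of the foods containing it (its signature) and memoizes one exclusion set per distinct signature in a cache, shared by all ingredients with equal signatures, instead of A's fresh nested scan over all foods with list-membership tests for every ingredient.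
import Mathlib
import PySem

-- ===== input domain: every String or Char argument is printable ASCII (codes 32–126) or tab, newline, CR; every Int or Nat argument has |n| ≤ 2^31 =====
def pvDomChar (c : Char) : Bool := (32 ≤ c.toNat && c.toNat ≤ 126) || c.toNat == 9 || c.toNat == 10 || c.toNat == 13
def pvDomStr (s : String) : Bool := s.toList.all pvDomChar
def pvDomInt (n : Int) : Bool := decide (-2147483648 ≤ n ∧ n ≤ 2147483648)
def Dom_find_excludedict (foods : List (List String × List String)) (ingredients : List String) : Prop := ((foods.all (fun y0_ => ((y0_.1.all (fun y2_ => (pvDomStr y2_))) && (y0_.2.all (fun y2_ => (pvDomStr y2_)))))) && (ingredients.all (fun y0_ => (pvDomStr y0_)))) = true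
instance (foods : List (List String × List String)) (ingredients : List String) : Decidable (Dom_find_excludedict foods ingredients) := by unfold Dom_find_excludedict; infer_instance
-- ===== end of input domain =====

-- B inverts the data into per-ingredient food-index signatures and memoizes one
-- exclusion set per distinct signature (shared by all ingredients with equal
-- signatures), instead of A's fresh nested scan per ingredient; return values are
-- proved equal on the whole domain (objective: alternative).

-- ===== PORT A =====
-- ingredient-major: for each ingredient, scan all foods and union the allergens of
-- foods whose ingredient list does not contain it
def find_excludedict (foods : List (List String × List String)) (ingredients : List String) : List (String × List String) :=
  (ingredients.foldl
    (fun (excludedict : PySem.Dict String (PySem.Set String)) ingredient =>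
      let exclusionset : PySem.Set String :=
        foods.foldl
          (fun s food => if ingredient ∉ food.1 then PySem.Set.update s food.2 else s)
          PySem.Set.empty
      PySem.Dict.update excludedict [(ingredient, exclusionset)])
    PySem.Dict.empty).items

-- ===== PORT B =====
-- inverted index: ingredient -> indices of foods containing it (its signature);
-- one exclusion set computed per distinct signature and shared through a cache
def find_excludedict_alt (foods : List (List String × List String)) (ingredients : List String) : List (String × List String) :=
  let containing : PySem.Dict String (List Int) :=
    (PySem.List.enumerate foods).foldl
      (fun c p =>
        (PySem.List.dedup p.2.1).foldl
          (fun c2 ing => c2.modify ing [] (fun l => l ++ [p.1])) c)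
      PySem.Dict.empty
  ((ingredients.foldl
      (fun (rc : PySem.Dict String (PySem.Set String) × PySem.Dict (List Int) (PySem.Set String)) ingredient =>
        let sig : List Int := containing.getD ingredient []
        let cache :=
          if rc.2.contains sig then rc.2
          else
            let present : PySem.Set Int := PySem.Set.ofList sig
            let exclusion : PySem.Set String :=
              (PySem.List.enumerate foods).foldl
                (fun s p => if p.1 ∉ present then PySem.Set.update s p.2.2 else s)
                PySem.Set.empty
            rc.2.insert sig exclusion
        (rc.1.insert ingredient (cache.getD sig PySem.Set.empty), cache))
      (PySem.Dict.empty, PySem.Dict.empty)).1).items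

-- ===== PRECONDITION & SPEC =====
def Spec_find_excludedict (foods : List (List String × List String)) (ingredients : List String) (out : List (String × List String)) : Prop := out = find_excludedict_alt foods ingredients
instance (foods : List (List String × List String)) (ingredients : List String) (out : List (String × List String)) : Decidable (Spec_find_excludedict foods ingredients out) := by unfold Spec_find_excludedict; infer_instance

-- ===== CLAIM (what is proved, stated in full; the proofs are below) =====
def Claim_equal_find_excludedict : Prop := ∀ (foods : List (List String × List String)) (ingredients : List String), Dom_find_excludedict foods ingredients → Spec_find_excludedict foods ingredients (find_excludedict foods ingredients)

-- ===== LEMMAS AND PROOFS =====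

-- A's per-ingredient exclusion set (the value A stores for key k)
def pvExF (foods : List (List String × List String)) (k : String) : PySem.Set String :=
  foods.foldl
    (fun s food => if k ∉ food.1 then PySem.Set.update s food.2 else s)
    PySem.Set.empty

-- folding "insert x (F x)" over xs, starting from a dict whose items are L.map (k, F k)
-- with L nodup, yields items (Set.update L xs).map (k, F k)
theorem pv_foldl_insert_items (F : String → PySem.Set String) :
    ∀ (xs L : List String), L.Nodup →
      (xs.foldl (fun d x => d.insert x (F x))
        (PySem.Dict.mk (L.map (fun k => (k, F k))))).items
        = (PySem.Set.update L xs).map (fun k => (k, F k)) := by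
  intro xs
  induction xs with
  | nil => intro L hnd; simp [PySem.Set.update]
  | cons x xs ih =>
    intro L hnd
    have hkeys : (PySem.Dict.mk (L.map (fun k => (k, F k)))).keys = L := by
      simp only [PySem.Dict.keys, List.map_map]
      rw [show ((fun p : String × PySem.Set String => p.1) ∘ fun k => (k, F k)) = id from rfl,
        List.map_id]
    by_cases hx : x ∈ L
    · have hc : (PySem.Dict.mk (L.map (fun k => (k, F k)))).contains x = true := by
        rw [PySem.Dict.contains_iff_mem_keys, hkeys]; exact hx
      have hins : (PySem.Dict.mk (L.map (fun k => (k, F k)))).insert x (F x)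
          = PySem.Dict.mk (L.map (fun k => (k, F k))) := by
        simp only [PySem.Dict.insert, hc, if_true]
        congr 1
        rw [List.map_map]
        apply List.map_congr_left
        intro k hk
        by_cases hkx : k = x
        · subst hkx; simp
        · simp [Function.comp, (by simpa using hkx : ¬ (k == x) = true)]
      rw [List.foldl_cons, hins, ih L hnd, PySem.Set.update_cons,
        PySem.Set.add_of_mem hx]
    · have hc : (PySem.Dict.mk (L.map (fun k => (k, F k)))).contains x = false := by
        rw [← Bool.not_eq_true, PySem.Dict.contains_iff_mem_keys, hkeys]
        exact hx
      have hins : (PySem.Dict.mk (L.map (fun k => (k, F k)))).insert x (F x)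
          = PySem.Dict.mk ((L ++ [x]).map (fun k => (k, F k))) := by
        simp [PySem.Dict.insert, hc]
      rw [List.foldl_cons, hins, ih (L ++ [x]) (List.Nodup.append hnd (List.nodup_singleton x)
          (by simpa using hx)),
        PySem.Set.update_cons, PySem.Set.add_of_not_mem hx]

-- A's items in canonical form
theorem pv_A_eq (foods : List (List String × List String)) (ingredients : List String) :
    find_excludedict foods ingredients
      = (PySem.Set.ofList ingredients).map (fun k => (k, pvExF foods k)) := by
  unfold find_excludedict
  have hfun : (fun (excludedict : PySem.Dict String (PySem.Set String)) ingredient =>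
      let exclusionset : PySem.Set String :=
        foods.foldl
          (fun s food => if ingredient ∉ food.1 then PySem.Set.update s food.2 else s)
          PySem.Set.empty
      PySem.Dict.update excludedict [(ingredient, exclusionset)])
      = (fun (d : PySem.Dict String (PySem.Set String)) x => d.insert x (pvExF foods x)) := by
    funext d x
    simp [PySem.Dict.update, pvExF]
  rw [hfun]
  have h0 : (PySem.Dict.empty : PySem.Dict String (PySem.Set String))
      = PySem.Dict.mk (([] : List String).map (fun k => (k, pvExF foods k))) := rfl
  rw [h0, pv_foldl_insert_items (pvExF foods) ingredients [] List.nodup_nil]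
  rw [PySem.Set.update_nil_left]

-- the per-signature exclusion set B computes (same expression as in the port)
def pvE (foods : List (List String × List String)) (sig : List Int) : PySem.Set String :=
  (PySem.List.enumerate foods).foldl
    (fun s p => if p.1 ∉ PySem.Set.ofList sig then PySem.Set.update s p.2.2 else s)
    PySem.Set.empty

-- B's inverted index as a dict value
def pvContaining (foods : List (List String × List String)) : PySem.Dict String (List Int) :=
  (PySem.List.enumerate foods).foldl
    (fun c p =>
      (PySem.List.dedup p.2.1).foldl
        (fun c2 ing => c2.modify ing [] (fun l => l ++ [p.1])) c)
    PySem.Dict.empty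

-- the (ingredient, food index) incidence pairs, flattened
def pvPairs (foods : List (List String × List String)) : List (String × Int) :=
  (PySem.List.enumerate foods).flatMap (fun p => (PySem.List.dedup p.2.1).map (fun g => (g, p.1)))

-- a fold of a fold is a fold over the flatMap
theorem pv_foldl_foldl {α β γ : Type} (h : β → List γ) (step : α → γ → α) :
    ∀ (l : List β) (init : α),
      l.foldl (fun acc b => (h b).foldl step acc) init = (l.flatMap h).foldl step init := by
  intro l
  induction l with
  | nil => intro init; simp
  | cons b bs ih => intro init; simp [List.foldl_append, ih]

-- the signature of an ingredient: the indices of the foods containing it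
theorem pv_containing_getD (foods : List (List String × List String)) (ing : String) :
    (pvContaining foods).getD ing []
      = ((pvPairs foods).filter (fun q => q.1 == ing)).map (fun q => q.2) := by
  unfold pvContaining pvPairs
  have hinner : (fun (c : PySem.Dict String (List Int)) (p : Int × (List String × List String)) =>
      (PySem.List.dedup p.2.1).foldl (fun c2 ing => c2.modify ing [] (fun l => l ++ [p.1])) c)
      = (fun (c : PySem.Dict String (List Int)) (p : Int × (List String × List String)) =>
      ((PySem.List.dedup p.2.1).map (fun g => (g, p.1))).foldl
        (fun c2 q => c2.modify q.1 [] (fun l => l ++ [q.2])) c) := by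
    funext c p
    rw [List.foldl_map]
  rw [hinner, pv_foldl_foldl]
  rw [PySem.Dict.getD_foldl_modify_append]
  simp

-- for an entry p of the enumeration, membership of p.1 in ing's signature is
-- exactly "ing is one of p's food's ingredients"
theorem pv_mem_sig (foods : List (List String × List String)) (ing : String)
    (p : Int × (List String × List String)) (hp : p ∈ PySem.List.enumerate foods) :
    p.1 ∈ (pvContaining foods).getD ing [] ↔ ing ∈ p.2.1 := by
  rw [pv_containing_getD]
  simp only [List.mem_map, List.mem_filter]
  constructor
  · rintro ⟨q, ⟨hq, hq1⟩, hq2⟩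
    have hq1' : q.1 = ing := by simpa using hq1
    subst hq1'
    unfold pvPairs at hq
    simp only [List.mem_flatMap, List.mem_map] at hq
    obtain ⟨r, hr, g, hg, hgr⟩ := hq
    obtain ⟨i, hi, rfl⟩ := (PySem.List.mem_enumerate_iff _ _ _).1 hr
    obtain ⟨k, hk, rfl⟩ := (PySem.List.mem_enumerate_iff _ _ _).1 hp
    have h1 : q.1 = g := by rw [← hgr]
    have h2 : q.2 = (0 + (i : Int)) := by rw [← hgr]
    have hik : i = k := by
      have := hq2
      rw [h2] at this
      simp at this ⊢
      omega
    subst hik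
    rw [h1]
    simpa using hg
  · intro hmem
    refine ⟨(ing, p.1), ⟨?_, by simp⟩, rfl⟩
    unfold pvPairs
    simp only [List.mem_flatMap, List.mem_map]
    exact ⟨p, hp, ing, by simpa using hmem, rfl⟩

-- B's per-signature set, applied to ing's signature, is A's exclusion set
theorem pv_E_sig (foods : List (List String × List String)) (ing : String) :
    pvE foods ((pvContaining foods).getD ing []) = pvExF foods ing := by
  unfold pvE pvExF
  have hcongr : (PySem.List.enumerate foods).foldl
      (fun s p => if p.1 ∉ PySem.Set.ofList ((pvContaining foods).getD ing []) then PySem.Set.update s p.2.2 else s)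
      PySem.Set.empty
      = (PySem.List.enumerate foods).foldl
      (fun s p => if ing ∉ p.2.1 then PySem.Set.update s p.2.2 else s)
      PySem.Set.empty := by
    apply PySem.List.foldl_congr_mem
    intro s p hp
    have h := pv_mem_sig foods ing p hp
    by_cases hm : ing ∈ p.2.1
    · rw [if_neg (by simp [PySem.Set.mem_ofList, h, hm]), if_neg (by simp [hm])]
    · rw [if_pos (by simp [PySem.Set.mem_ofList, h, hm]), if_pos (by simp [hm])]
  rw [hcongr]
  conv_rhs => rw [← PySem.List.map_snd_enumerate foods 0]
  rw [List.foldl_map]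

-- the result/cache fold: as long as every cached value is E of its key, the
-- result component is a plain insert fold with values E (sigf x)
theorem pv_cache_fold (sigf : String → List Int) (E : List Int → PySem.Set String) :
    ∀ (xs : List String) (res : PySem.Dict String (PySem.Set String))
      (cache : PySem.Dict (List Int) (PySem.Set String)),
      (∀ k, cache.contains k = true → cache.getD k PySem.Set.empty = E k) →
      (xs.foldl (fun rc x =>
          let sig := sigf x
          let cache2 := if rc.2.contains sig then rc.2 else rc.2.insert sig (E sig)
          (rc.1.insert x (cache2.getD sig PySem.Set.empty), cache2)) (res, cache)).1
        = xs.foldl (fun d x => d.insert x (E (sigf x))) res := by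
  intro xs
  induction xs with
  | nil => intro res cache _; simp
  | cons x xs ih =>
    intro res cache hinv
    simp only [List.foldl_cons]
    by_cases hc : cache.contains (sigf x) = true
    · rw [if_pos hc]
      rw [ih (res.insert x (cache.getD (sigf x) PySem.Set.empty)) cache hinv,
        hinv (sigf x) hc]
    · rw [if_neg hc]
      have hget : (cache.insert (sigf x) (E (sigf x))).getD (sigf x) PySem.Set.empty
          = E (sigf x) := PySem.Dict.getD_insert_self _ _ _ _
      rw [ih _ _ ?_, hget]
      intro k hk
      rw [PySem.Dict.contains_insert] at hk
      by_cases hks : k = sigf x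
      · subst hks; exact PySem.Dict.getD_insert_self _ _ _ _
      · rw [PySem.Dict.getD_insert]
        rw [if_neg hks]
        apply hinv
        simpa [hks] using hk

-- B's items in the same canonical form
theorem pv_B_eq (foods : List (List String × List String)) (ingredients : List String) :
    find_excludedict_alt foods ingredients
      = (PySem.Set.ofList ingredients).map (fun k => (k, pvExF foods k)) := by
  have h1 := pv_cache_fold (fun x => (pvContaining foods).getD x []) (pvE foods)
    ingredients PySem.Dict.empty PySem.Dict.empty
    (by intro k hk; simp [PySem.Dict.empty, PySem.Dict.contains] at hk)
  have h2 : (ingredients.foldl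
      (fun (d : PySem.Dict String (PySem.Set String)) x =>
        d.insert x (pvE foods ((fun x => (pvContaining foods).getD x []) x)))
      PySem.Dict.empty)
      = ingredients.foldl
        (fun (d : PySem.Dict String (PySem.Set String)) x => d.insert x (pvExF foods x))
        PySem.Dict.empty := by
    apply PySem.List.foldl_congr_mem
    intro d x _
    rw [show ((fun x => (pvContaining foods).getD x []) x) = (pvContaining foods).getD x [] from rfl,
      pv_E_sig]
  calc find_excludedict_alt foods ingredients
      = (ingredients.foldl
          (fun (d : PySem.Dict String (PySem.Set String)) x =>
            d.insert x (pvE foods ((fun x => (pvContaining foods).getD x []) x)))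
          PySem.Dict.empty).items := congrArg PySem.Dict.items h1
    _ = (ingredients.foldl
          (fun (d : PySem.Dict String (PySem.Set String)) x => d.insert x (pvExF foods x))
          PySem.Dict.empty).items := by rw [h2]
    _ = (PySem.Set.ofList ingredients).map (fun k => (k, pvExF foods k)) := by
          rw [show (PySem.Dict.empty : PySem.Dict String (PySem.Set String))
              = PySem.Dict.mk (([] : List String).map (fun k => (k, pvExF foods k))) from rfl,
            pv_foldl_insert_items (pvExF foods) ingredients [] List.nodup_nil,
            PySem.Set.update_nil_left]

-- ===== VERDICT (by name: the statement is the Claim_ definition above) =====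
theorem find_excludedict_spec : Claim_equal_find_excludedict := by
  intro foods ingredients _
  unfold Spec_find_excludedict
  rw [pv_A_eq, pv_B_eq]
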